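-- pv_equiv track=rewrite | github.com/Link1565/MewgenicsCN | mewgenics_cn_patch.py | _is_inside_tag
-- ===== SOURCE A (Python) =====
-- def _is_inside_tag(text, pos):
--     """检查位置是否在[...]或{...}标签内"""
--     depth_sq = depth_br = 0
--     for i in range(pos, -1, -1):
--         if text[i] == ']': depth_sq += 1
--         elif text[i] == '[':
--             depth_sq -= 1
--             if depth_sq < 0: return True
--         elif text[i] == '}': depth_br += 1
--         elif text[i] == '{':
--             depth_br -= 1
--             if depth_br < 0: return True
--     return False
-- ===== SOURCE B (Python) =====
-- def _is_inside_tag(text, pos):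
--     """检查位置是否在[...]或{...}标签内"""
--     depth_sq = depth_br = 0
--     for i in range(pos + 1):
--         ch = text[i]
--         if ch == '[':
--             depth_sq += 1
--         elif ch == ']':
--             depth_sq = max(depth_sq - 1, 0)
--         elif ch == '{':
--             depth_br += 1
--         elif ch == '}':
--             depth_br = max(depth_br - 1, 0)
--     return depth_sq > 0 or depth_br > 0
-- ===== Notes on version B (the rewrite author's own statement) =====
-- stated objective: alternative
-- what changed: Replaces A's backward scan from pos with early-return on negative depth by a single forward scan over 0..pos keeping zero-clamped open-bracket counters and deciding only once at the end.
import Mathlib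
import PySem

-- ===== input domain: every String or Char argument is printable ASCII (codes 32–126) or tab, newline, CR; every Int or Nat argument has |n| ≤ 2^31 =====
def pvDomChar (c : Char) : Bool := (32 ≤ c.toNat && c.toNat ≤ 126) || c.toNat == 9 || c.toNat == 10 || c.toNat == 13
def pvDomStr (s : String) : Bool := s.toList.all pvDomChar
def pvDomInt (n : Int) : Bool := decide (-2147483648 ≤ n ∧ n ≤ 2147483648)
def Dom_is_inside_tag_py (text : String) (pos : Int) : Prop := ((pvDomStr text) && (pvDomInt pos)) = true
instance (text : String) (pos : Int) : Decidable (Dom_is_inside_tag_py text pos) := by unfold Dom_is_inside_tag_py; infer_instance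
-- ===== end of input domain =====

-- B replaces A's backward scan with early return by a forward scan over 0..pos with
-- zero-clamped open-bracket counters, decided once at the end (alternative decomposition, same cost).


-- ===== PORT A =====
-- backward loop over range(pos, -1, -1); out-of-range lookup defaulted (excluded by Pre_)
def pvLoopA (text : List Char) : List Int → Int → Int → Bool
  | [], _, _ => false
  | i :: rest, sq, br =>
    let c := PySem.List.pyGetD text i ' '
    if c = ']' then pvLoopA text rest (sq + 1) br
    else if c = '[' then (if sq - 1 < 0 then true else pvLoopA text rest (sq - 1) br)
    else if c = '}' then pvLoopA text rest sq (br + 1)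
    else if c = '{' then (if br - 1 < 0 then true else pvLoopA text rest sq (br - 1))
    else pvLoopA text rest sq br

def is_inside_tag_py (text : String) (pos : Int) : Bool :=
  pvLoopA text.toList (PySem.List.pyRange pos (-1) (-1)) 0 0

-- ===== PORT B =====
def pvStepB (text : List Char) (st : Int × Int) (i : Int) : Int × Int :=
  let c := PySem.List.pyGetD text i ' '
  if c = '[' then (st.1 + 1, st.2)
  else if c = ']' then (max (st.1 - 1) 0, st.2)
  else if c = '{' then (st.1, st.2 + 1)
  else if c = '}' then (st.1, max (st.2 - 1) 0)
  else st

def is_inside_tag_py_alt (text : String) (pos : Int) : Bool :=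
  let st := (PySem.List.pyRange 0 (pos + 1) 1).foldl (pvStepB text.toList) (0, 0)
  decide (st.1 > 0) || decide (st.2 > 0)

-- ===== PRECONDITION & SPEC =====
-- Both Pythons raise IndexError when pos ≥ len(text); negative pos gives an empty loop and is fine.
def Pre_is_inside_tag_py (text : String) (pos : Int) : Prop := pos < (text.toList.length : Int)
instance (text : String) (pos : Int) : Decidable (Pre_is_inside_tag_py text pos) := by unfold Pre_is_inside_tag_py; infer_instance
def pvWitness_is_inside_tag_py : String × Int := ("a[b", 2)

def Spec_is_inside_tag_py (text : String) (pos : Int) (out : Bool) : Prop := out = is_inside_tag_py_alt text pos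
instance (text : String) (pos : Int) (out : Bool) : Decidable (Spec_is_inside_tag_py text pos out) := by unfold Spec_is_inside_tag_py; infer_instance

-- ===== CLAIM (what is proved, stated in full; the proofs are below) =====
def Claim_equal_is_inside_tag_py : Prop := ∀ (text : String) (pos : Int), Dom_is_inside_tag_py text pos → Pre_is_inside_tag_py text pos → Spec_is_inside_tag_py text pos (is_inside_tag_py text pos)

-- ===== LEMMAS AND PROOFS =====

def pvD (o c x : Char) : Int := if x = o then 1 else if x = c then -1 else 0

-- maximum over prefixes of (#opens − #closes), clamped at 0
def pvN (o c : Char) : List Char → Int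
  | [] => 0
  | x :: r => max 0 (pvN o c r + pvD o c x)

lemma pvN_nonneg (o c : Char) (l : List Char) : 0 ≤ pvN o c l := by
  cases l <;> simp [pvN]

lemma pvDecide_congr (a : Int) {x y : Int} (h : x = y) :
    decide (a < x) = decide (a < y) := by rw [h]

lemma pvOr_eq (P P' Q Q' : Prop) [Decidable P] [Decidable P'] [Decidable Q] [Decidable Q']
    (hp : P ↔ P') (hq : Q ↔ Q') : (decide P || decide Q) = (decide P' || decide Q') := by
  simp [hp, hq]

lemma pvLoopA_eq (text : List Char) (idxs : List Int) :
    ∀ sq br : Int, 0 ≤ sq → 0 ≤ br →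
      pvLoopA text idxs sq br =
        (decide (sq < pvN '[' ']' (idxs.map (fun i => PySem.List.pyGetD text i ' '))) ||
         decide (br < pvN '{' '}' (idxs.map (fun i => PySem.List.pyGetD text i ' ')))) := by
  induction idxs with
  | nil => intro sq br hsq hbr; simp [pvLoopA, pvN]; omega
  | cons i rest ih =>
    intro sq br hsq hbr
    have h1 := pvN_nonneg '[' ']' (rest.map (fun i => PySem.List.pyGetD text i ' '))
    have h2 := pvN_nonneg '{' '}' (rest.map (fun i => PySem.List.pyGetD text i ' '))
    show (if PySem.List.pyGetD text i ' ' = ']' then pvLoopA text rest (sq + 1) br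
      else if PySem.List.pyGetD text i ' ' = '[' then
        (if sq - 1 < 0 then true else pvLoopA text rest (sq - 1) br)
      else if PySem.List.pyGetD text i ' ' = '}' then pvLoopA text rest sq (br + 1)
      else if PySem.List.pyGetD text i ' ' = '{' then
        (if br - 1 < 0 then true else pvLoopA text rest sq (br - 1))
      else pvLoopA text rest sq br) = _
    by_cases e1 : PySem.List.pyGetD text i ' ' = ']'
    · rw [if_pos e1, ih (sq + 1) br (by omega) hbr,
        pvDecide_congr sq (show pvN '[' ']' ((i :: rest).map (fun i => PySem.List.pyGetD text i ' ')) =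
          max 0 (pvN '[' ']' (rest.map (fun i => PySem.List.pyGetD text i ' ')) - 1) from by
            rw [List.map_cons, e1]; simp [pvN, pvD]; ring_nf),
        pvDecide_congr br (show pvN '{' '}' ((i :: rest).map (fun i => PySem.List.pyGetD text i ' ')) =
          pvN '{' '}' (rest.map (fun i => PySem.List.pyGetD text i ' ')) from by
            rw [List.map_cons, e1]; simp [pvN, pvD]; omega)]
      exact pvOr_eq _ _ _ _ (by omega) (by omega)
    · by_cases e2 : PySem.List.pyGetD text i ' ' = '['
      · rw [if_neg e1, if_pos e2,
          pvDecide_congr sq (show pvN '[' ']' ((i :: rest).map (fun i => PySem.List.pyGetD text i ' ')) =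
            pvN '[' ']' (rest.map (fun i => PySem.List.pyGetD text i ' ')) + 1 from by
              rw [List.map_cons, e2]; simp [pvN, pvD]; omega),
          pvDecide_congr br (show pvN '{' '}' ((i :: rest).map (fun i => PySem.List.pyGetD text i ' ')) =
            pvN '{' '}' (rest.map (fun i => PySem.List.pyGetD text i ' ')) from by
              rw [List.map_cons, e2]; simp [pvN, pvD]; omega)]
        by_cases hsq0 : sq - 1 < 0
        · rw [if_pos hsq0]
          have hlt : sq < pvN '[' ']' (rest.map (fun i => PySem.List.pyGetD text i ' ')) + 1 := by omega
          simp [hlt]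
        · rw [if_neg hsq0, ih (sq - 1) br (by omega) hbr]
          exact pvOr_eq _ _ _ _ (by omega) (by omega)
      · by_cases e3 : PySem.List.pyGetD text i ' ' = '}'
        · rw [if_neg e1, if_neg e2, if_pos e3, ih sq (br + 1) hsq (by omega),
            pvDecide_congr sq (show pvN '[' ']' ((i :: rest).map (fun i => PySem.List.pyGetD text i ' ')) =
              pvN '[' ']' (rest.map (fun i => PySem.List.pyGetD text i ' ')) from by
                rw [List.map_cons, e3]; simp [pvN, pvD]; omega),
            pvDecide_congr br (show pvN '{' '}' ((i :: rest).map (fun i => PySem.List.pyGetD text i ' ')) =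
              max 0 (pvN '{' '}' (rest.map (fun i => PySem.List.pyGetD text i ' ')) - 1) from by
                rw [List.map_cons, e3]; simp [pvN, pvD]; ring_nf)]
          exact pvOr_eq _ _ _ _ (by omega) (by omega)
        · by_cases e4 : PySem.List.pyGetD text i ' ' = '{'
          · rw [if_neg e1, if_neg e2, if_neg e3, if_pos e4,
              pvDecide_congr sq (show pvN '[' ']' ((i :: rest).map (fun i => PySem.List.pyGetD text i ' ')) =
                pvN '[' ']' (rest.map (fun i => PySem.List.pyGetD text i ' ')) from by
                  rw [List.map_cons, e4]; simp [pvN, pvD]; omega),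
              pvDecide_congr br (show pvN '{' '}' ((i :: rest).map (fun i => PySem.List.pyGetD text i ' ')) =
                pvN '{' '}' (rest.map (fun i => PySem.List.pyGetD text i ' ')) + 1 from by
                  rw [List.map_cons, e4]; simp [pvN, pvD]; omega)]
            by_cases hbr0 : br - 1 < 0
            · rw [if_pos hbr0]
              have hlt : br < pvN '{' '}' (rest.map (fun i => PySem.List.pyGetD text i ' ')) + 1 := by omega
              simp [hlt]
            · rw [if_neg hbr0, ih sq (br - 1) hsq (by omega)]
              exact pvOr_eq _ _ _ _ (by omega) (by omega)
          · rw [if_neg e1, if_neg e2, if_neg e3, if_neg e4, ih sq br hsq hbr,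
              pvDecide_congr sq (show pvN '[' ']' ((i :: rest).map (fun i => PySem.List.pyGetD text i ' ')) =
                pvN '[' ']' (rest.map (fun i => PySem.List.pyGetD text i ' ')) from by
                  rw [List.map_cons]; simp [pvN, pvD, e1, e2]; omega),
              pvDecide_congr br (show pvN '{' '}' ((i :: rest).map (fun i => PySem.List.pyGetD text i ' ')) =
                pvN '{' '}' (rest.map (fun i => PySem.List.pyGetD text i ' ')) from by
                  rw [List.map_cons]; simp [pvN, pvD, e3, e4]; omega)]

lemma pvFoldB_eq (text : List Char) (idxs : List Int) :
    idxs.foldl (pvStepB text) (0, 0) =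
      (pvN '[' ']' ((idxs.map (fun i => PySem.List.pyGetD text i ' ')).reverse),
       pvN '{' '}' ((idxs.map (fun i => PySem.List.pyGetD text i ' ')).reverse)) := by
  induction idxs using List.reverseRecOn with
  | nil => simp [pvN]
  | append_singleton l x ih =>
    have h1 := pvN_nonneg '[' ']' ((l.map (fun i => PySem.List.pyGetD text i ' ')).reverse)
    have h2 := pvN_nonneg '{' '}' ((l.map (fun i => PySem.List.pyGetD text i ' ')).reverse)
    have hrev : ((l ++ [x]).map (fun i => PySem.List.pyGetD text i ' ')).reverse =
        PySem.List.pyGetD text x ' ' :: (l.map (fun i => PySem.List.pyGetD text i ' ')).reverse := by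
      simp
    rw [List.foldl_append, List.foldl_cons, List.foldl_nil, ih, hrev]
    show pvStepB text _ x = _
    unfold pvStepB
    by_cases e1 : PySem.List.pyGetD text x ' ' = '['
    · rw [if_pos e1, e1]
      simp only [pvN, pvD]
      rw [Prod.mk.injEq]; constructor <;> simp <;> omega
    · by_cases e2 : PySem.List.pyGetD text x ' ' = ']'
      · rw [if_neg e1, if_pos e2, e2]
        simp only [pvN, pvD]
        rw [Prod.mk.injEq]; constructor <;> simp <;> omega
      · by_cases e3 : PySem.List.pyGetD text x ' ' = '{'
        · rw [if_neg e1, if_neg e2, if_pos e3, e3]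
          simp only [pvN, pvD]
          rw [Prod.mk.injEq]; constructor <;> simp <;> omega
        · by_cases e4 : PySem.List.pyGetD text x ' ' = '}'
          · rw [if_neg e1, if_neg e2, if_neg e3, if_pos e4, e4]
            simp only [pvN, pvD]
            rw [Prod.mk.injEq]; constructor <;> simp <;> omega
          · rw [if_neg e1, if_neg e2, if_neg e3, if_neg e4]
            simp only [pvN, pvD]
            rw [Prod.mk.injEq]
            constructor <;> simp [e1, e2, e3, e4] <;> omega

-- ===== VERDICT (by name: the statement is the Claim_ definition above) =====
theorem is_inside_tag_py_spec : Claim_equal_is_inside_tag_py := by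
  intro text pos _ _
  unfold Spec_is_inside_tag_py is_inside_tag_py is_inside_tag_py_alt
  rw [show PySem.List.pyRange pos (-1) (-1) = (PySem.List.pyRange 0 (pos + 1) 1).reverse from by
        simpa using PySem.List.pyRange_neg_one_eq_reverse pos (-1)]
  rw [pvLoopA_eq text.toList _ 0 0 le_rfl le_rfl]
  simp only [pvFoldB_eq, List.map_reverse, gt_iff_lt]
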